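-- pv_equiv track=rewrite | github.com/acampove/rx_run3 | src/rx_calibration/hltcalibration/model_factory.py | _get_pdf_types
-- ===== SOURCE A (Python) =====
-- def _get_pdf_types(l_name) -> list[tuple[str,str]]:
--     d_name_freq = {}
--
--     l_type = []
--     for name in l_name:
--         if name not in d_name_freq:
--             d_name_freq[name] = 1
--         else:
--             d_name_freq[name]+= 1
--
--         frq = d_name_freq[name]
--         frq = f'_{frq}'
--
--         l_type.append((name, frq))
--
--     return l_type
-- ===== SOURCE B (Python) =====
-- def _get_pdf_types(l_name) -> list[tuple[str, str]]:
--     # Group-by-name: collect each name's positions, then number within each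
--     # group and write the pairs back into a result list at those positions.
--     groups = {}
--     for i, name in enumerate(l_name):
--         groups.setdefault(name, []).append(i)
--     out = [None] * len(l_name)
--     for name, idxs in groups.items():
--         for j, pos in enumerate(idxs):
--             out[pos] = (name, f'_{j + 1}')
--     return out
-- ===== Notes on version B (the rewrite author's own statement) =====
-- stated objective: alternative
-- what changed: Replaces A's single pass with a running per-name counter dict by a group-by structure: first build a dict mapping each name to the list of its positions, then number each group 1,2,... and write the pairs back into a preallocated result list at those positions.
import Mathlib
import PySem

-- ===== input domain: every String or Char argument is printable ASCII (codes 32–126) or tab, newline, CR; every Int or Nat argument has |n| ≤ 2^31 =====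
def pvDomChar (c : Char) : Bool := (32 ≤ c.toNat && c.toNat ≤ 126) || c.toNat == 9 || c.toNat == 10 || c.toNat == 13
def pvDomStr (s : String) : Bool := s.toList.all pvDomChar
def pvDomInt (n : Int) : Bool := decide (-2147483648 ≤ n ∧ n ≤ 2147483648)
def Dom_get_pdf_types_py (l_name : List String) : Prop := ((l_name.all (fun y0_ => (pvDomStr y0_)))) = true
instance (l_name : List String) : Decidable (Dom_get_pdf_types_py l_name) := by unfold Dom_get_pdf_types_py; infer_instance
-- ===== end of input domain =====

-- B replaces A's running per-name counter pass by a group-by: positions per name, then numbered writes back into a preallocated list (alternative decomposition, same cost).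


-- ===== PORT A =====
-- loop body of A: update the frequency dict (branching exactly as the Python does),
-- read the updated count back, append (name, '_<frq>');  d[name] is read with getD _ 0 — the key is always present at that point
def pvStepA (st : PySem.Dict String Int × List (String × String)) (name : String) :
    PySem.Dict String Int × List (String × String) :=
  let d := if !st.1.contains name then st.1.insert name 1 else st.1.modify name 0 (· + 1)
  (d, st.2 ++ [(name, "_" ++ PySem.Int.toStr (d.getD name 0))])

def get_pdf_types_py (l_name : List String) : List (String × String) :=
  (l_name.foldl pvStepA (PySem.Dict.empty, [])).2

-- ===== PORT B =====
-- groups.setdefault(name, []).append(i): behaviourally d.modify name [] (· ++ [i])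
-- (inserts the key at the end on first occurrence, appends to its list otherwise, like Python)
def pvGroups (l_name : List String) : PySem.Dict String (List Int) :=
  (PySem.List.enumerate l_name).foldl (fun d p => d.modify p.2 [] (· ++ [p.1])) PySem.Dict.empty

-- inner loop: for j, pos in enumerate(idxs): out[pos] = (name, f'_{j+1}')
-- (positions are valid nonnegative indices, so out[pos] is the in-range write List.set)
def pvFill (out : List (String × String)) (name : String) (idxs : List Int) : List (String × String) :=
  (PySem.List.enumerate idxs).foldl (fun o q => o.set q.2.toNat (name, "_" ++ PySem.Int.toStr (q.1 + 1))) out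

def get_pdf_types_py_alt (l_name : List String) : List (String × String) :=
  -- out = [None] * len(l_name): the placeholder ("", "") stands for None; every slot is overwritten
  (pvGroups l_name).items.foldl (fun out kv => pvFill out kv.1 kv.2)
    (List.replicate l_name.length ("", ""))

-- ===== PRECONDITION & SPEC =====
def Spec_get_pdf_types_py (l_name : List String) (out : List (String × String)) : Prop := out = get_pdf_types_py_alt l_name
instance (l_name : List String) (out : List (String × String)) : Decidable (Spec_get_pdf_types_py l_name out) := by unfold Spec_get_pdf_types_py; infer_instance

-- ===== CLAIM (what is proved, stated in full; the proofs are below) =====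
def Claim_equal_get_pdf_types_py : Prop := ∀ (l_name : List String), Dom_get_pdf_types_py l_name → Spec_get_pdf_types_py l_name (get_pdf_types_py l_name)

-- ===== LEMMAS AND PROOFS =====

-- common characterisation both ports are proved equal to: the i-th element is (name, '_<count of name in l[:i+1]>')
def pvSpecMap (l : List String) : List (String × String) :=
  (PySem.List.enumerate l).map (fun p => (p.2, "_" ++ PySem.Int.toStr ((List.count p.2 (l.take (p.1.toNat + 1)) : Nat) : Int)))

lemma pvSpecMap_append (l : List String) (x : String) :
    pvSpecMap (l ++ [x]) = pvSpecMap l ++ [(x, "_" ++ PySem.Int.toStr ((l.count x : Int) + 1))] := by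
  simp only [pvSpecMap, PySem.List.enumerate_append, List.map_append]
  congr 1
  · apply List.map_congr_left
    intro p hp
    obtain ⟨k, hk, rfl⟩ := (PySem.List.mem_enumerate_iff l 0 p).mp hp
    have h1 : ((0 : Int) + (k : Int)).toNat = k := by omega
    rw [h1, List.take_append_of_le_length (by omega)]
  · simp only [PySem.List.enumerate, List.map]
    have h1 : ((0 : Int) + (l.length : Int)).toNat = l.length := by omega
    rw [h1]
    rw [List.take_of_length_le (by simp)]
    simp [List.count_append]

-- ===== A-side: the dict component of A's fold counts occurrences in the processed prefix =====
lemma pvStepA_getD_self (d : PySem.Dict String Int) (acc : List (String × String)) (name : String) :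
    ((pvStepA (d, acc) name).1).getD name 0 = d.getD name 0 + 1 := by
  simp only [pvStepA]
  by_cases h : d.contains name = true
  · simp [h, PySem.Dict.getD_modify_self]
  · simp only [Bool.not_eq_true] at h
    simp [h, PySem.Dict.getD_insert_self, PySem.Dict.getD_of_not_contains d 0 h]

lemma pvStepA_getD_other (d : PySem.Dict String Int) (acc : List (String × String)) (name v : String)
    (hv : v ≠ name) : ((pvStepA (d, acc) name).1).getD v 0 = d.getD v 0 := by
  simp only [pvStepA]
  by_cases h : d.contains name = true
  · simp [h, PySem.Dict.getD_modify_of_ne d 0 _ hv]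
  · simp only [Bool.not_eq_true] at h
    simp [h, PySem.Dict.getD_insert_of_ne d 1 0 hv]

lemma pv_fold_fst_getD (l : List String) : ∀ (d : PySem.Dict String Int) (acc : List (String × String)) (v : String),
    ((l.foldl pvStepA (d, acc)).1).getD v 0 = d.getD v 0 + l.count v := by
  induction l with
  | nil => intro d acc v; simp
  | cons x xs ih =>
    intro d acc v
    simp only [List.foldl_cons]
    have h1 := ih ((pvStepA (d, acc) x).1) ((pvStepA (d, acc) x).2) v
    have h2 : xs.foldl pvStepA (pvStepA (d, acc) x) = xs.foldl pvStepA ((pvStepA (d, acc) x).1, (pvStepA (d, acc) x).2) := by rfl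
    rw [h2, h1]
    by_cases hv : v = x
    · subst hv; rw [pvStepA_getD_self]; simp; ring
    · rw [pvStepA_getD_other d acc x v hv]
      simp [Ne.symm hv]

lemma pv_A_eq_specMap (l : List String) : get_pdf_types_py l = pvSpecMap l := by
  induction l using List.reverseRecOn with
  | nil => rfl
  | append_singleton l x ih =>
    have hd : ((pvStepA (l.foldl pvStepA (PySem.Dict.empty, [])) x).1).getD x 0
        = (l.count x : Int) + 1 := by
      rw [show (l.foldl pvStepA (PySem.Dict.empty, []))
            = ((l.foldl pvStepA (PySem.Dict.empty, [])).1, (l.foldl pvStepA (PySem.Dict.empty, [])).2) from rfl,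
          pvStepA_getD_self, pv_fold_fst_getD]
      simp
    have hA : get_pdf_types_py (l ++ [x])
        = get_pdf_types_py l ++ [(x, "_" ++ PySem.Int.toStr ((l.count x : Int) + 1))] := by
      simp only [get_pdf_types_py, List.foldl_append, List.foldl_cons, List.foldl_nil]
      rw [show (l.foldl pvStepA (PySem.Dict.empty, []))
            = ((l.foldl pvStepA (PySem.Dict.empty, [])).1, (l.foldl pvStepA (PySem.Dict.empty, [])).2) from rfl] at hd ⊢
      simp only [pvStepA] at hd ⊢
      rw [hd]
    rw [hA, pvSpecMap_append, ih]

-- ===== B-side =====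
-- positions of `name` in l, in increasing order (what pvGroups stores under `name`)
def pvPosOf (l : List String) (name : String) : List Int :=
  (((PySem.List.enumerate l).filter (fun p => p.2 == name)).map (fun p => p.1))

lemma pvGroups_getD (l : List String) (name : String) :
    (pvGroups l).getD name [] = pvPosOf l name := by
  have h := PySem.Dict.getD_foldl_modify_append ((PySem.List.enumerate l).map Prod.swap) (PySem.Dict.empty (κ := String) (ν := List Int)) name
  rw [List.foldl_map] at h
  simp only [Prod.swap] at h
  unfold pvGroups pvPosOf
  rw [h]
  simp only [PySem.Dict.getD_empty, List.nil_append, List.filter_map, List.map_map]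
  apply List.map_congr_left
  intro p hp; rfl

lemma pvGroups_keys (l : List String) : (pvGroups l).keys = PySem.Set.ofList l := by
  unfold pvGroups
  rw [PySem.Dict.keys_foldl_modify_key (PySem.List.enumerate l) (fun p => p.2) [] (fun d p v => v ++ [p.1]) PySem.Dict.empty]
  simp [PySem.List.map_snd_enumerate, PySem.Dict.keys_empty, PySem.Set.ofList_eq_foldl, PySem.Set.update]

lemma pvGroups_nodup_keys (l : List String) : (pvGroups l).keys.Nodup := by
  unfold pvGroups
  exact PySem.Dict.nodup_keys_foldl_modify_key _ (fun (p : Int × String) => p.2) [] (fun d p v => v ++ [p.1]) _ (by simp)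

lemma pvPosOf_mem (l : List String) (name : String) (j : Int) :
    j ∈ pvPosOf l name ↔ ∃ (k : Nat) (h : k < l.length), j = (k : Int) ∧ l[k] = name := by
  unfold pvPosOf
  simp only [List.mem_map, List.mem_filter, PySem.List.mem_enumerate_iff]
  constructor
  · rintro ⟨p, ⟨⟨k, hk, rfl⟩, hname⟩, rfl⟩
    exact ⟨k, hk, by omega, by simpa using hname⟩
  · rintro ⟨k, hk, rfl, hname⟩
    exact ⟨((k : Int), l[k]), ⟨⟨k, hk, by simp⟩, by simpa using hname⟩, rfl⟩

lemma pvPosOf_pairwise (l : List String) (name : String) : (pvPosOf l name).Pairwise (· < ·) := by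
  unfold pvPosOf
  exact List.Pairwise.map _ (fun a b h => h) ((PySem.List.pairwise_lt_enumerate l 0).filter _)

lemma pvPosOf_append (l : List String) (x name : String) :
    pvPosOf (l ++ [x]) name = pvPosOf l name ++ (if x == name then [(l.length : Int)] else []) := by
  unfold pvPosOf
  rw [PySem.List.enumerate_append, List.filter_append, List.map_append]
  congr 1
  simp only [PySem.List.enumerate, List.filter]
  by_cases h : x == name
  · simp [h]
  · simp [h]

lemma pvPosOf_length (l : List String) (name : String) :
    (pvPosOf l name).length = l.count name := by
  unfold pvPosOf
  rw [List.length_map, ← List.countP_eq_length_filter]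
  conv_rhs => rw [← PySem.List.map_snd_enumerate l 0]
  rw [List.count_eq_countP, List.countP_map]
  rfl

-- index within its group: the occurrence index of position i is the count in l[:i]
lemma pvPosOf_getElem (l : List String) (i : Nat) (hi : i < l.length) :
    (pvPosOf l l[i])[(l.take i).count l[i]]? = some (i : Int) := by
  induction l using List.reverseRecOn generalizing i with
  | nil => simp at hi
  | append_singleton l x ih =>
    rw [List.length_append, List.length_singleton] at hi
    by_cases h : i < l.length
    · have hget : (l ++ [x])[i] = l[i] := List.getElem_append_left h
      rw [hget, pvPosOf_append, List.take_append_of_le_length (by omega)]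
      have hc : (l.take i).count l[i] < (pvPosOf l l[i]).length := by
        rw [pvPosOf_length]
        set v := l[i] with hv
        have h2 : List.count v l = List.count v (l.take (i+1)) + List.count v (l.drop (i+1)) := by
          conv_lhs => rw [← List.take_append_drop (i+1) l]
          rw [List.count_append]
        have h3 : l.take (i+1) = l.take i ++ [v] := by
          rw [List.take_add_one, List.getElem?_eq_getElem h]
          rfl
        rw [h3, List.count_append] at h2
        simp at h2
        omega
      rw [List.getElem?_append_left hc]
      exact ih i h
    · have hi' : i = l.length := by omega
      subst hi'
      have hget : (l ++ [x])[l.length] = x := by simp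
      rw [hget, pvPosOf_append]
      have ht : List.take l.length (l ++ [x]) = l := by
        rw [List.take_append_of_le_length (le_refl _), List.take_of_length_le (le_refl _)]
      rw [ht, if_pos (beq_self_eq_true x), List.getElem?_append_right (by rw [pvPosOf_length]), pvPosOf_length]
      simp

lemma pvPosOf_nonneg (l : List String) (name : String) : ∀ q ∈ pvPosOf l name, 0 ≤ q := by
  intro q hq
  obtain ⟨k, hk, rfl, -⟩ := (pvPosOf_mem l name q).mp hq
  positivity

lemma pv_not_mem_posOf (l : List String) (name : String) (i : Nat) (hi : i < l.length)
    (h : name ≠ l[i]) : (i : Int) ∉ pvPosOf l name := by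
  intro hc
  obtain ⟨k, hk, hki, hname⟩ := (pvPosOf_mem l name _).mp hc
  have : k = i := by omega
  subst this
  exact h hname.symm

-- pvFill with an arbitrary enumerate start, for the induction
def pvFillFrom (s : Int) (out : List (String × String)) (name : String) (idxs : List Int) : List (String × String) :=
  (PySem.List.enumerate idxs s).foldl (fun o q => o.set q.2.toNat (name, "_" ++ PySem.Int.toStr (q.1 + 1))) out

lemma pvFill_eq (out : List (String × String)) (name : String) (idxs : List Int) :
    pvFill out name idxs = pvFillFrom 0 out name idxs := rfl

lemma pvFillFrom_cons (s : Int) (out : List (String × String)) (name : String) (q : Int) (rest : List Int) :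
    pvFillFrom s out name (q :: rest)
      = pvFillFrom (s + 1) (out.set q.toNat (name, "_" ++ PySem.Int.toStr (s + 1))) name rest := by
  unfold pvFillFrom
  rw [PySem.List.enumerate_cons, List.foldl_cons]

lemma pvFillFrom_length (out : List (String × String)) (name : String) (idxs : List Int) (s : Int) :
    (pvFillFrom s out name idxs).length = out.length := by
  induction idxs generalizing s out with
  | nil => rfl
  | cons q rest ih =>
    rw [pvFillFrom_cons, ih]
    exact List.length_set ..

lemma pvFillFrom_get_not_mem (out : List (String × String)) (name : String) (idxs : List Int) (s : Int)
    (i : Nat) (h : (i : Int) ∉ idxs) (hpos : ∀ q ∈ idxs, 0 ≤ q) :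
    (pvFillFrom s out name idxs)[i]? = out[i]? := by
  induction idxs generalizing s out with
  | nil => rfl
  | cons q rest ih =>
    rw [pvFillFrom_cons]
    rw [ih _ _ (fun hc => h (List.mem_cons_of_mem _ hc)) (fun a ha => hpos a (List.mem_cons_of_mem _ ha))]
    apply List.getElem?_set_ne
    have h1 : (i : Int) ≠ q := fun hc => h (hc ▸ List.mem_cons_self ..)
    have h2 : 0 ≤ q := hpos q (List.mem_cons_self ..)
    omega

lemma pvFillFrom_get_mem (out : List (String × String)) (name : String) (idxs : List Int) (s : Int)
    (hpw : idxs.Pairwise (· < ·)) (hpos : ∀ q ∈ idxs, 0 ≤ q)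
    (j i : Nat) (hj : idxs[j]? = some (i : Int)) (hi : i < out.length) :
    (pvFillFrom s out name idxs)[i]? = some (name, "_" ++ PySem.Int.toStr (s + (j : Int) + 1)) := by
  induction idxs generalizing s out j with
  | nil => simp at hj
  | cons q rest ih =>
    rw [pvFillFrom_cons]
    cases j with
    | zero =>
      simp only [List.getElem?_cons_zero, Option.some_inj] at hj
      subst hj
      have hnm : ((i : Int)) ∉ rest := by
        intro hc
        have := (List.pairwise_cons.mp hpw).1 _ hc
        omega
      rw [pvFillFrom_get_not_mem _ _ _ _ _ hnm (fun a ha => hpos a (List.mem_cons_of_mem _ ha))]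
      have : ((i : Int)).toNat = i := by omega
      rw [this, List.getElem?_set_self hi]
      norm_num
    | succ j =>
      simp only [List.getElem?_cons_succ] at hj
      have hlen : i < (out.set q.toNat (name, "_" ++ PySem.Int.toStr (s + 1))).length := by
        rw [List.length_set]; exact hi
      have := ih (out.set q.toNat (name, "_" ++ PySem.Int.toStr (s + 1))) (s + 1)
        (List.pairwise_cons.mp hpw).2 (fun a ha => hpos a (List.mem_cons_of_mem _ ha)) j hj hlen
      rw [this]
      have harg : s + 1 + (j : Int) + 1 = s + ((j : Nat) + 1 : Nat) + 1 := by push_cast; ring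
      rw [harg]

lemma pvFill_len (out : List (String × String)) (name : String) (idxs : List Int) :
    (pvFill out name idxs).length = out.length := by
  rw [pvFill_eq]; exact pvFillFrom_length ..

lemma pvFill_not_mem (out : List (String × String)) (name : String) (idxs : List Int)
    (i : Nat) (h : (i : Int) ∉ idxs) (hpos : ∀ q ∈ idxs, 0 ≤ q) :
    (pvFill out name idxs)[i]? = out[i]? := by
  rw [pvFill_eq]; exact pvFillFrom_get_not_mem out name idxs 0 i h hpos

lemma pvFill_mem (out : List (String × String)) (name : String) (idxs : List Int)
    (hpw : idxs.Pairwise (· < ·)) (hpos : ∀ q ∈ idxs, 0 ≤ q)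
    (j i : Nat) (hj : idxs[j]? = some (i : Int)) (hi : i < out.length) :
    (pvFill out name idxs)[i]? = some (name, "_" ++ PySem.Int.toStr ((j : Int) + 1)) := by
  rw [pvFill_eq, pvFillFrom_get_mem out name idxs 0 hpw hpos j i hj hi]
  have : (0 : Int) + (j : Int) + 1 = (j : Int) + 1 := by ring
  rw [this]

lemma pv_outer_length (l : List String) (S : List String) (out : List (String × String)) :
    (S.foldl (fun o name => pvFill o name (pvPosOf l name)) out).length = out.length := by
  induction S generalizing out with
  | nil => rfl
  | cons name rest ih => rw [List.foldl_cons, ih, pvFill_len]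

lemma pv_outer_not_mem (l : List String) (S : List String) (out : List (String × String))
    (i : Nat) (hi : i < l.length) (h : l[i] ∉ S) :
    (S.foldl (fun o name => pvFill o name (pvPosOf l name)) out)[i]? = out[i]? := by
  induction S generalizing out with
  | nil => rfl
  | cons name rest ih =>
    rw [List.foldl_cons, ih _ (fun hc => h (List.mem_cons_of_mem _ hc))]
    exact pvFill_not_mem _ _ _ _
      (pv_not_mem_posOf l name i hi (fun hc => h (hc ▸ List.mem_cons_self ..)))
      (pvPosOf_nonneg l name)

lemma pv_outer_mem (l : List String) (S : List String) (out : List (String × String))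
    (hnd : S.Nodup) (i : Nat) (hi : i < l.length) (h : l[i] ∈ S) (hlen : out.length = l.length) :
    (S.foldl (fun o name => pvFill o name (pvPosOf l name)) out)[i]?
      = some (l[i], "_" ++ PySem.Int.toStr (((l.take i).count l[i] : Int) + 1)) := by
  induction S generalizing out with
  | nil => simp at h
  | cons name rest ih =>
    rw [List.foldl_cons]
    by_cases hn : name = l[i]
    · have hrest : l[i] ∉ rest := hn ▸ (List.nodup_cons.mp hnd).1
      rw [pv_outer_not_mem l rest _ i hi hrest, hn]
      exact pvFill_mem _ _ _ (pvPosOf_pairwise l l[i]) (pvPosOf_nonneg l l[i])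
        _ i (pvPosOf_getElem l i hi) (by omega)
    · have hrest : l[i] ∈ rest := by
        rcases List.mem_cons.mp h with hc | hc
        · exact absurd hc.symm hn
        · exact hc
      rw [ih _ (List.nodup_cons.mp hnd).2 hrest (by rw [pvFill_len]; exact hlen)]

lemma pv_B_eq_specMap (l : List String) : get_pdf_types_py_alt l = pvSpecMap l := by
  unfold get_pdf_types_py_alt
  rw [PySem.Dict.items_eq_map_keys _ (pvGroups_nodup_keys l) [], List.foldl_map]
  have hfun : (fun (o : List (String × String)) k => pvFill o k ((pvGroups l).getD k []))
      = fun o k => pvFill o k (pvPosOf l k) := by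
    funext o k; rw [pvGroups_getD]
  rw [hfun, pvGroups_keys]
  apply List.ext_getElem?
  intro i
  by_cases hi : i < l.length
  · have hmem : l[i] ∈ PySem.Set.ofList l := (PySem.Set.mem_ofList _ _).mpr (List.getElem_mem hi)
    rw [pv_outer_mem l _ _ (PySem.Set.nodup_ofList l) i hi hmem (by simp)]
    unfold pvSpecMap
    rw [List.getElem?_map, PySem.List.getElem?_enumerate, List.getElem?_eq_getElem hi]
    simp only [Option.map_some]
    have h0 : ((0 : Int) + (i : Int)).toNat = i := by omega
    rw [h0]
    have h3 : l.take (i+1) = l.take i ++ [l[i]] := by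
      rw [List.take_add_one, List.getElem?_eq_getElem hi]
      rfl
    rw [h3, List.count_append]
    simp only [Option.some_inj]
    congr 2
    push_cast
    simp
  · have h1 : i ≥ l.length := by omega
    rw [List.getElem?_eq_none, List.getElem?_eq_none]
    · unfold pvSpecMap
      simp [PySem.List.length_enumerate, h1]
    · rw [pv_outer_length]
      simpa using h1

-- ===== VERDICT (by name: the statement is the Claim_ definition above) =====
theorem get_pdf_types_py_spec : Claim_equal_get_pdf_types_py := by
  intro l _
  unfold Spec_get_pdf_types_py
  rw [pv_A_eq_specMap, pv_B_eq_specMap]
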